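-- pv_equiv track=rewrite | github.com/AviNoah/Leetcode | problems/prob_1590.py | sum_array_approach_naive
-- ===== SOURCE A (Python) =====
-- from typing import List
--
-- def sum_array_approach_naive(nums: List[int], p: int) -> int:
--
--     def make_sum_array(nums: List[int]) -> List[int]:
--         # O(n)
--         sum_array: List[int] = []
--         for num in nums:
--             if sum_array:
--                 sum_array.append(sum_array[-1] + num)
--             else:
--                 sum_array.append(num)
--
--         return sum_array
--
--     N = len(nums)
--
--     sum_array = make_sum_array(nums)
--
--     if sum_array[-1] < p:
--         return -1
--
--     remainder = sum_array[-1] % p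
--
--     if remainder == 0:
--         return 0
--
--     sum_array.insert(0, 0)
--
--     min_len = N
--     # O(n^2)
--     for i in range(N + 1):
--         for j in range(i + 1, N + 1):
--             if (sum_array[j] - sum_array[i]) % p == remainder:
--                 min_len = min(min_len, j - i)
--                 break  # no point in continuing, this is the min
--
--     if min_len == N:
--         return -1
--     return min_len
-- ===== SOURCE B (Python) =====
-- from typing import List
--
-- def sum_array_approach_naive(nums: List[int], p: int) -> int:
--     # One pass with a hashmap of the most recent index of each prefix residue (O(n)).
--     total = sum(nums)
--     if total < p:
--         return -1
--     remainder = total % p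
--     if remainder == 0:
--         return 0
--     n = len(nums)
--     best = n
--     last = {0: 0}
--     cur = 0
--     j = 0
--     for num in nums:
--         j += 1
--         cur = (cur + num) % p
--         need = (cur - remainder) % p
--         if need in last:
--             best = min(best, j - last[need])
--         last[cur] = j
--     return -1 if best == n else best
-- ===== Notes on version B (the rewrite author's own statement) =====
-- stated objective: faster
-- what changed: Replaced A's O(n^2) scan over all prefix-sum pairs (i,j) by a single O(n) pass that keeps a hashmap from each prefix-sum residue mod p to its most recent index, so the inner scan disappears.
import Mathlib
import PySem

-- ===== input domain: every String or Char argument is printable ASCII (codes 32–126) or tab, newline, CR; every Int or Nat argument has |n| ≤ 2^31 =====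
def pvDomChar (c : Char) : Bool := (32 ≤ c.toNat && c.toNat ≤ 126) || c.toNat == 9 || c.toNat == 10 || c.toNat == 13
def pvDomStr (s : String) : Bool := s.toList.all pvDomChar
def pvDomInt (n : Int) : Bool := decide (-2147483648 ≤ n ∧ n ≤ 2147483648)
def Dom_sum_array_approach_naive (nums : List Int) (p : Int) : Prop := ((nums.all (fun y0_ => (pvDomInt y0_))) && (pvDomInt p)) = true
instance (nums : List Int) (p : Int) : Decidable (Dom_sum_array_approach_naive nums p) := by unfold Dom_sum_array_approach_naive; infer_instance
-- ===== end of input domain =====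

-- B replaces A's O(n^2) double scan over prefix-sum pairs by one pass with a map
-- from each prefix-sum residue mod p to its most recent index (objective: faster).

-- ===== PORT A =====
-- make_sum_array: running prefix sums built by appending
def makeSumArray (nums : List Int) : List Int :=
  nums.foldl
    (fun sa num =>
      if !sa.isEmpty then sa ++ [PySem.List.pyGetD sa (-1) 0 + num]
      else sa ++ [num])
    []

-- the inner 'for j in range(i+1, N+1): if …: min; break' loop
def innerLoopA (sa2 : List Int) (p r i : Int) (m : Int) : List Int → Int
  | [] => m
  | j :: rest =>
    if PySem.Int.mod (PySem.List.pyGetD sa2 j 0 - PySem.List.pyGetD sa2 i 0) p = r then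
      min m (j - i)
    else innerLoopA sa2 p r i m rest

def sum_array_approach_naive (nums : List Int) (p : Int) : Int :=
  let N : Int := PySem.List.len nums
  let sumArray := makeSumArray nums
  -- sum_array[-1]: IndexError on empty nums, excluded by Pre_
  let total := PySem.List.pyGetD sumArray (-1) 0
  if total < p then -1
  else
    let remainder := PySem.Int.mod total p
    if remainder = 0 then 0
    else
      let sa2 := PySem.List.insert sumArray 0 0
      let minLen :=
        (PySem.List.pyRange 0 (N + 1) 1).foldl
          (fun m i => innerLoopA sa2 p remainder i m (PySem.List.pyRange (i + 1) (N + 1) 1))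
          N
      if minLen = N then -1 else minLen

-- ===== PORT B =====
-- one step of B's single pass: state (best, last, cur, j)
def stepB (p remainder : Int) (st : Int × PySem.Dict Int Int × Int × Int) (num : Int) :
    Int × PySem.Dict Int Int × Int × Int :=
  let best := st.1
  let last := st.2.1
  let cur0 := st.2.2.1
  let j0 := st.2.2.2
  let j := j0 + 1
  let cur := PySem.Int.mod (cur0 + num) p
  let need := PySem.Int.mod (cur - remainder) p
  let best' := if last.contains need then min best (j - last.getD need 0) else best
  (best', last.insert cur j, cur, j)

def sum_array_approach_naive_alt (nums : List Int) (p : Int) : Int :=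
  let total := nums.sum
  if total < p then -1
  else
    let remainder := PySem.Int.mod total p
    if remainder = 0 then 0
    else
      let n : Int := PySem.List.len nums
      let st := nums.foldl (stepB p remainder) (n, PySem.Dict.empty.insert 0 0, 0, 0)
      if st.1 = n then -1 else st.1

-- ===== PRECONDITION & SPEC =====
-- Pre_ excludes exactly the inputs where A raises: empty nums (IndexError on sum_array[-1])
-- and p = 0 with sum(nums) ≥ p (ZeroDivisionError in 'total % p').
def Pre_sum_array_approach_naive (nums : List Int) (p : Int) : Prop :=
  nums ≠ [] ∧ (p ≠ 0 ∨ nums.sum < p)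
instance (nums : List Int) (p : Int) : Decidable (Pre_sum_array_approach_naive nums p) := by
  unfold Pre_sum_array_approach_naive; infer_instance
def pvWitness_sum_array_approach_naive : List Int × Int := ([1, 2, 3], 3)

def Spec_sum_array_approach_naive (nums : List Int) (p : Int) (out : Int) : Prop :=
  out = sum_array_approach_naive_alt nums p
instance (nums : List Int) (p : Int) (out : Int) : Decidable (Spec_sum_array_approach_naive nums p out) := by
  unfold Spec_sum_array_approach_naive; infer_instance

-- ===== CLAIM (what is proved, stated in full; the proofs are below) =====
def Claim_equal_sum_array_approach_naive : Prop :=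
  ∀ (nums : List Int) (p : Int), Dom_sum_array_approach_naive nums p →
    Pre_sum_array_approach_naive nums p →
    Spec_sum_array_approach_naive nums p (sum_array_approach_naive nums p)

-- ===== LEMMAS AND PROOFS =====

-- ---- Python floor-mod arithmetic ----
theorem pm_sub_dvd (a p : Int) : p ∣ (a - PySem.Int.mod a p) := by
  refine ⟨PySem.Int.floordiv a p, ?_⟩
  have h := PySem.Int.floordiv_mul_add_mod a p
  have := mul_comm (PySem.Int.floordiv a p) p
  linarith

theorem pm_congr (p x y : Int) (hp : p ≠ 0) (h : p ∣ (x - y)) :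
    PySem.Int.mod x p = PySem.Int.mod y p := by
  have hx := pm_sub_dvd x p
  have hy := pm_sub_dvd y p
  have hd : p ∣ (PySem.Int.mod x p - PySem.Int.mod y p) := by
    have he : PySem.Int.mod x p - PySem.Int.mod y p
        = (x - PySem.Int.mod x p) * (-1) + (y - PySem.Int.mod y p) + (x - y) := by ring
    rw [he]
    exact dvd_add (dvd_add (Dvd.dvd.mul_right hx (-1)) hy) h
  have key : PySem.Int.mod x p - PySem.Int.mod y p = 0 := by
    rcases lt_or_gt_of_ne hp with hneg | hpos
    · have bx := PySem.Int.mod_neg_bounds (a := x) (b := p) hneg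
      have by' := PySem.Int.mod_neg_bounds (a := y) (b := p) hneg
      refine Int.eq_zero_of_abs_lt_dvd ((neg_dvd).mpr hd) ?_
      rw [abs_lt]; constructor <;> omega
    · have bx1 := PySem.Int.mod_nonneg (a := x) (b := p) hpos
      have bx2 := PySem.Int.mod_lt (a := x) (b := p) hpos
      have by1 := PySem.Int.mod_nonneg (a := y) (b := p) hpos
      have by2 := PySem.Int.mod_lt (a := y) (b := p) hpos
      refine Int.eq_zero_of_abs_lt_dvd hd ?_
      rw [abs_lt]; constructor <;> omega
  omega

theorem pm_zero (p : Int) : PySem.Int.mod 0 p = 0 := by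
  simp [PySem.Int.mod]

theorem pm_idem (a p : Int) (hp : p ≠ 0) :
    PySem.Int.mod (PySem.Int.mod a p) p = PySem.Int.mod a p := by
  refine pm_congr p _ a hp ?_
  have := pm_sub_dvd a p
  have he : PySem.Int.mod a p - a = (a - PySem.Int.mod a p) * (-1) := by ring
  rw [he]; exact Dvd.dvd.mul_right this (-1)

theorem pm_add_left (a b p : Int) (hp : p ≠ 0) :
    PySem.Int.mod (PySem.Int.mod a p + b) p = PySem.Int.mod (a + b) p := by
  refine pm_congr p _ _ hp ?_
  have := pm_sub_dvd a p
  have he : (PySem.Int.mod a p + b) - (a + b) = (a - PySem.Int.mod a p) * (-1) := by ring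
  rw [he]; exact Dvd.dvd.mul_right this (-1)

theorem pm_sub_left (a b p : Int) (hp : p ≠ 0) :
    PySem.Int.mod (PySem.Int.mod a p - b) p = PySem.Int.mod (a - b) p := by
  have h := pm_add_left a (-b) p hp
  simpa [sub_eq_add_neg] using h

theorem pm_eq_imp_dvd (x y p : Int) (h : PySem.Int.mod x p = PySem.Int.mod y p) :
    p ∣ (x - y) := by
  have hx := pm_sub_dvd x p
  have hy := pm_sub_dvd y p
  have h0 : PySem.Int.mod x p - PySem.Int.mod y p = 0 := by rw [h]; ring
  have he : x - y = (x - PySem.Int.mod x p) + (y - PySem.Int.mod y p) * (-1)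
      + (PySem.Int.mod x p - PySem.Int.mod y p) := by ring
  rw [he, h0, add_zero]
  exact dvd_add hx (Dvd.dvd.mul_right hy (-1))

-- residue test the scan uses ↔ the pair condition of A
theorem cond_iff (p r A si : Int) (hp : p ≠ 0) (hr : PySem.Int.mod r p = r) :
    PySem.Int.mod si p = PySem.Int.mod (A - r) p ↔ PySem.Int.mod (A - si) p = r := by
  constructor
  · intro h
    have hd := pm_eq_imp_dvd si (A - r) p h
    have : PySem.Int.mod (A - si) p = PySem.Int.mod r p := by
      refine pm_congr p _ _ hp ?_
      have he : (A - si) - r = (si - (A - r)) * (-1) := by ring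
      rw [he]; exact Dvd.dvd.mul_right hd (-1)
    rw [this, hr]
  · intro h
    refine pm_congr p _ _ hp ?_
    have hd : p ∣ ((A - si) - r) := by
      have := pm_eq_imp_dvd (A - si) r p (by rw [h, hr])
      exact this
    have he : si - (A - r) = ((A - si) - r) * (-1) := by ring
    rw [he]; exact Dvd.dvd.mul_right hd (-1)

-- ---- prefix sums ----
def Sf (nums : List Int) (k : ℕ) : Int := (nums.take k).sum

def validP (nums : List Int) (p r : Int) (i j : ℕ) : Prop :=
  i < j ∧ j ≤ nums.length ∧ PySem.Int.mod (Sf nums j - Sf nums i) p = r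

def goodShape (nums : List Int) (p r : Int) (v : Int) : Prop :=
  v = (nums.length : Int) ∨ ∃ i j : ℕ, validP nums p r i j ∧ v = (j : Int) - (i : Int)

-- abstract (Nat-indexed) forms of the two loops
def innerN (nums : List Int) (p r : Int) (i : ℕ) (m : Int) : List ℕ → Int
  | [] => m
  | j :: rest =>
    if PySem.Int.mod (Sf nums j - Sf nums i) p = r then min m ((j : Int) - (i : Int))
    else innerN nums p r i m rest

def MAdef (nums : List Int) (p r : Int) : Int :=
  (List.range (nums.length + 1)).foldl
    (fun m i => innerN nums p r i m (List.range' (i + 1) (nums.length - i)))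
    (nums.length : Int)

-- running prefix sums, structurally
def psums (t : Int) : List Int → List Int
  | [] => []
  | x :: xs => (t + x) :: psums (t + x) xs

theorem step_eq (sa : List Int) (num : Int) :
    (if !sa.isEmpty then sa ++ [PySem.List.pyGetD sa (-1) 0 + num] else sa ++ [num])
    = sa ++ [sa.getLastD 0 + num] := by
  cases sa with
  | nil => simp
  | cons x xs =>
    have hne : (x :: xs) ≠ [] := by simp
    rw [if_pos (by simp), PySem.List.pyGetD_neg_one (x :: xs) 0 hne]
    simp [List.getLastD_eq_getLast?, List.getLast?_eq_some_getLast hne]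

theorem foldl_step_eq (nums : List Int) : ∀ acc : List Int,
    nums.foldl
      (fun sa num =>
        if !sa.isEmpty then sa ++ [PySem.List.pyGetD sa (-1) 0 + num]
        else sa ++ [num]) acc
    = acc ++ psums (acc.getLastD 0) nums := by
  induction nums with
  | nil => intro acc; simp [psums]
  | cons num rest ih =>
    intro acc
    rw [List.foldl_cons, step_eq, ih (acc ++ [acc.getLastD 0 + num])]
    simp [psums]

theorem psums_eq (xs : List Int) : ∀ t : Int,
    psums t xs = (List.range xs.length).map (fun k => t + Sf xs (k + 1)) := by
  induction xs with
  | nil => intro t; simp [psums]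
  | cons x rest ih =>
    intro t
    simp only [psums, List.length_cons, List.range_succ_eq_map, List.map_cons, List.map_map]
    congr 1
    · simp [Sf]
    · rw [ih (t + x)]
      apply List.map_congr_left
      intro k _
      simp [Sf, List.take_succ_cons]
      ring

theorem makeSumArray_eq (nums : List Int) :
    makeSumArray nums = (List.range nums.length).map (fun k => Sf nums (k + 1)) := by
  unfold makeSumArray
  rw [foldl_step_eq nums []]
  simp [psums_eq]

theorem length_makeSumArray (nums : List Int) :
    (makeSumArray nums).length = nums.length := by
  rw [makeSumArray_eq]; simp

theorem total_eq (nums : List Int) (hne : nums ≠ []) :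
    PySem.List.pyGetD (makeSumArray nums) (-1) 0 = nums.sum := by
  have hlen : (makeSumArray nums).length = nums.length := length_makeSumArray nums
  have hmne : makeSumArray nums ≠ [] := by
    intro h; apply hne
    rw [h] at hlen
    simpa [List.length_eq_zero_iff] using hlen.symm
  rw [PySem.List.pyGetD_neg_one (makeSumArray nums) 0 hmne]
  have h1 : (makeSumArray nums).getLast hmne = (makeSumArray nums).getLastD 0 := by
    simp [List.getLastD_eq_getLast?, List.getLast?_eq_some_getLast hmne]
  rw [h1, makeSumArray_eq]
  obtain ⟨m, hm⟩ : ∃ m, nums.length = m + 1 :=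
    ⟨nums.length - 1, by have := List.length_pos_iff.mpr hne; omega⟩
  rw [hm, List.range_succ, List.map_append]
  simp only [List.map_cons, List.map_nil, List.getLastD_concat]
  rw [Sf, ← hm, List.take_length]

theorem sa2_get (nums : List Int) (k : ℕ) (hk : k ≤ nums.length) :
    PySem.List.pyGetD (0 :: makeSumArray nums) (k : Int) 0 = Sf nums k := by
  rw [PySem.List.pyGetD_natCast]
  cases k with
  | zero => simp [Sf]
  | succ m =>
    have hm : m < nums.length := by omega
    have : (0 :: makeSumArray nums).getD (m + 1) 0 = (makeSumArray nums).getD m 0 := by rfl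
    rw [this, makeSumArray_eq]
    rw [List.getD_eq_getElem?_getD]
    rw [List.getElem?_map]
    simp [List.getElem?_range hm]

theorem insert_zero (xs : List Int) (v : Int) : PySem.List.insert xs 0 v = v :: xs := by
  simp [PySem.List.insert, PySem.List.sliceIndices]

-- ---- generic fold lemmas ----
theorem foldl_le {α : Type} (f : Int → α → Int) (h : ∀ m x, f m x ≤ m) :
    ∀ (l : List α) (m : Int), l.foldl f m ≤ m := by
  intro l
  induction l with
  | nil => intro m; simp
  | cons x rest ih => intro m; exact le_trans (ih (f m x)) (h m x)

theorem foldl_inv {α : Type} (f : Int → α → Int) (P : Int → Prop) :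
    ∀ (l : List α) (m : Int), (∀ m x, x ∈ l → P m → P (f m x)) → P m → P (l.foldl f m) := by
  intro l
  induction l with
  | nil => intro m _ hm; simpa
  | cons x rest ih =>
    intro m h hm
    exact ih (f m x) (fun m' y hy => h m' y (List.mem_cons_of_mem x hy))
      (h m x (List.mem_cons_self) hm)

-- ---- inner loop properties ----
theorem innerN_le (nums : List Int) (p r : Int) (i : ℕ) :
    ∀ (js : List ℕ) (m : Int), innerN nums p r i m js ≤ m := by
  intro js
  induction js with
  | nil => intro m; simp [innerN]
  | cons j rest ih =>
    intro m
    simp only [innerN]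
    split
    · exact min_le_left _ _
    · exact ih m

theorem innerN_shape (nums : List Int) (p r : Int) (i : ℕ) :
    ∀ (js : List ℕ) (m : Int), (∀ j ∈ js, i < j ∧ j ≤ nums.length) →
      goodShape nums p r m → goodShape nums p r (innerN nums p r i m js) := by
  intro js
  induction js with
  | nil => intro m _ hm; simpa [innerN]
  | cons j rest ih =>
    intro m hjs hm
    simp only [innerN]
    split
    · rename_i hcond
      rcases le_total m ((j : Int) - (i : Int)) with hle | hle
      · rw [min_eq_left hle]; exact hm
      · rw [min_eq_right hle]
        right
        exact ⟨i, j, ⟨(hjs j (List.mem_cons_self)).1, (hjs j (List.mem_cons_self)).2, hcond⟩, rfl⟩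
    · exact ih m (fun j' hj' => hjs j' (List.mem_cons_of_mem j hj')) hm

theorem innerN_hit (nums : List Int) (p r : Int) (i : ℕ) :
    ∀ (js : List ℕ) (m : Int) (j : ℕ), js.Pairwise (· < ·) → j ∈ js →
      PySem.Int.mod (Sf nums j - Sf nums i) p = r →
      innerN nums p r i m js ≤ (j : Int) - (i : Int) := by
  intro js
  induction js with
  | nil => intro m j _ hj; simp at hj
  | cons j' rest ih =>
    intro m j hsort hj hcond
    simp only [innerN]
    split
    · rename_i hcond'
      have hj'le : j' ≤ j := by
        rcases List.mem_cons.mp hj with h | h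
        · omega
        · exact le_of_lt ((List.pairwise_cons.mp hsort).1 j h)
      calc min m ((j' : Int) - i) ≤ (j' : Int) - i := min_le_right _ _
        _ ≤ (j : Int) - i := by
            have : (j' : Int) ≤ (j : Int) := by exact_mod_cast hj'le
            omega
    · rename_i hcond'
      have hjrest : j ∈ rest := by
        rcases List.mem_cons.mp hj with h | h
        · exact absurd (h ▸ hcond) hcond'
        · exact h
      exact ih m j (List.pairwise_cons.mp hsort).2 hjrest hcond

-- ---- A-side characterization ----
theorem MA_le (nums : List Int) (p r : Int) : MAdef nums p r ≤ (nums.length : Int) :=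
  foldl_le _ (fun m i => innerN_le nums p r i _ m) _ _

theorem MA_shape (nums : List Int) (p r : Int) : goodShape nums p r (MAdef nums p r) := by
  unfold MAdef
  apply foldl_inv _ (goodShape nums p r)
  · intro m i hi hm
    apply innerN_shape
    · intro j hj
      have := List.mem_range'_1.mp hj
      have hiN : i < nums.length + 1 := List.mem_range.mp hi
      omega
    · exact hm
  · left; rfl

theorem MA_low (nums : List Int) (p r : Int) (i j : ℕ) (h : validP nums p r i j) :
    MAdef nums p r ≤ (j : Int) - (i : Int) := by
  obtain ⟨hij, hjN, hcond⟩ := h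
  have hiN : i ∈ List.range (nums.length + 1) := List.mem_range.mpr (by omega)
  obtain ⟨l1, l2, hsplit⟩ := List.append_of_mem hiN
  unfold MAdef
  rw [hsplit, List.foldl_append, List.foldl_cons]
  refine le_trans (foldl_le _ (fun m i' => innerN_le nums p r i' _ m) _ _) ?_
  apply innerN_hit
  · exact List.pairwise_lt_range' 1 (by norm_num)
  · exact List.mem_range'_1.mpr (by omega)
  · exact hcond

-- ---- bridge: the literal port-A loops equal the Nat-indexed forms ----
theorem inner_bridge (nums : List Int) (p r : Int) (i : ℕ) (hi : i ≤ nums.length) :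
    ∀ (js : List ℕ), (∀ j ∈ js, j ≤ nums.length) → ∀ m : Int,
      innerLoopA (0 :: makeSumArray nums) p r (i : Int) m (js.map Int.ofNat)
      = innerN nums p r i m js := by
  intro js
  induction js with
  | nil => intro _ m; rfl
  | cons j rest ih =>
    intro hjs m
    have hj : j ≤ nums.length := hjs j List.mem_cons_self
    simp only [List.map_cons, innerLoopA, innerN]
    rw [show (Int.ofNat j) = (j : Int) from rfl]
    rw [sa2_get nums j hj, sa2_get nums i hi]
    split
    · rfl
    · exact ih (fun j' hj' => hjs j' (List.mem_cons_of_mem j hj')) m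

theorem A_loop_val (nums : List Int) (p r : Int) :
    (PySem.List.pyRange 0 (PySem.List.len nums + 1) 1).foldl
      (fun m i => innerLoopA (PySem.List.insert (makeSumArray nums) 0 0) p r i m
        (PySem.List.pyRange (i + 1) (PySem.List.len nums + 1) 1))
      (PySem.List.len nums)
    = MAdef nums p r := by
  rw [insert_zero]
  simp only [PySem.List.len_eq]
  rw [PySem.List.pyRange_one]
  have ht : (((nums.length : Int) + 1) - 0).toNat = nums.length + 1 := by omega
  rw [ht, List.foldl_map]
  unfold MAdef
  apply PySem.List.foldl_congr_mem
  intro m k hk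
  have hkN : k ≤ nums.length := by have := List.mem_range.mp hk; omega
  have hrange : PySem.List.pyRange (0 + (k : Int) + 1) ((nums.length : Int) + 1) 1
      = (List.range' (k + 1) (nums.length - k)).map Int.ofNat := by
    rw [PySem.List.pyRange_one]
    have ht2 : (((nums.length : Int) + 1) - (0 + (k : Int) + 1)).toNat = nums.length - k := by
      omega
    rw [ht2, List.range'_eq_map_range, List.map_map]
    apply List.map_congr_left
    intro t _
    simp only [Function.comp_apply, Int.ofNat_eq_natCast]
    push_cast
    ring
  rw [hrange]
  have h0k : (0 : Int) + (k : Int) = (k : Int) := by ring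
  rw [h0k]
  apply inner_bridge nums p r k hkN
  intro j hj
  have := List.mem_range'_1.mp hj
  omega

-- ---- B-side invariant ----
theorem Sf_succ (nums : List Int) (j : ℕ) (h : j < nums.length) :
    Sf nums (j + 1) = Sf nums j + nums[j] := List.sum_take_succ nums j h

def dictInv (nums : List Int) (p : Int) (j : ℕ) (d : PySem.Dict Int Int) : Prop :=
  (∀ ρ v, d.get? ρ = some v → ∃ k : ℕ, v = (k : Int) ∧ k ≤ j ∧
      PySem.Int.mod (Sf nums k) p = ρ ∧
      ∀ k' : ℕ, k' ≤ j → PySem.Int.mod (Sf nums k') p = ρ → k' ≤ k)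
  ∧ (∀ k : ℕ, k ≤ j → d.contains (PySem.Int.mod (Sf nums k) p) = true)

def stInv (nums : List Int) (p r : Int) (j : ℕ)
    (st : Int × PySem.Dict Int Int × Int × Int) : Prop :=
  st.2.2.2 = (j : Int) ∧ st.2.2.1 = PySem.Int.mod (Sf nums j) p ∧ dictInv nums p j st.2.1 ∧
  st.1 ≤ (nums.length : Int) ∧ goodShape nums p r st.1 ∧
  ∀ i' j' : ℕ, validP nums p r i' j' → j' ≤ j → st.1 ≤ (j' : Int) - (i' : Int)

theorem B_step (nums : List Int) (p r : Int) (hp : p ≠ 0)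
    (hrmod : PySem.Int.mod r p = r) (j : ℕ) (hj : j < nums.length)
    (num : Int) (hnum : num = nums[j])
    (st : Int × PySem.Dict Int Int × Int × Int) (hst : stInv nums p r j st) :
    stInv nums p r (j + 1) (stepB p r st num) := by
  obtain ⟨hjj, hcur, ⟨hsound, hcomp⟩, hle, hshape, hlow⟩ := hst
  have hcur' : PySem.Int.mod (st.2.2.1 + num) p = PySem.Int.mod (Sf nums (j + 1)) p := by
    rw [hcur, pm_add_left _ _ p hp, hnum, ← Sf_succ nums j hj]
  have hneed : PySem.Int.mod (PySem.Int.mod (st.2.2.1 + num) p - r) p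
      = PySem.Int.mod (Sf nums (j + 1) - r) p := by
    rw [hcur', pm_sub_left _ _ p hp]
  have hiff : ∀ i' : ℕ,
      PySem.Int.mod (Sf nums i') p = PySem.Int.mod (Sf nums (j + 1) - r) p ↔
      PySem.Int.mod (Sf nums (j + 1) - Sf nums i') p = r :=
    fun i' => cond_iff p r (Sf nums (j + 1)) (Sf nums i') hp hrmod
  simp only [stepB]
  refine ⟨?_, ?_, ⟨?_, ?_⟩, ?_, ?_, ?_⟩
  · simp only [hjj]; push_cast; ring
  · exact hcur'
  · -- dict soundness
    intro ρ v hv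
    rw [PySem.Dict.get?_insert] at hv
    split at hv
    · rename_i hρ
      refine ⟨j + 1, ?_, le_refl _, ?_, fun k' hk' _ => hk'⟩
      · have hv' := Option.some.inj hv
        rw [← hv', hjj]; push_cast; ring
      · rw [hρ]; exact hcur'.symm
    · rename_i hρ
      obtain ⟨k, hk1, hk2, hk3, hk4⟩ := hsound ρ v hv
      refine ⟨k, hk1, by omega, hk3, ?_⟩
      intro k' hk' hρ'
      rcases Nat.lt_or_ge k' (j + 1) with h | h
      · exact hk4 k' (by omega) hρ'
      · exfalso
        have : k' = j + 1 := by omega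
        subst this
        rw [hcur'] at hρ
        exact hρ hρ'.symm
  · -- dict completeness
    intro k hk
    rw [PySem.Dict.contains_insert]
    rcases Nat.lt_or_ge k (j + 1) with h | h
    · rw [hcomp k (by omega)]
      simp
    · have : k = j + 1 := by omega
      subst this
      rw [hcur']
      simp
  · -- best ≤ N
    split
    · exact le_trans (min_le_left _ _) hle
    · exact hle
  · -- shape
    split
    · rename_i hc
      rw [PySem.Dict.contains_eq_isSome_get?] at hc
      obtain ⟨v, hv⟩ := Option.isSome_iff_exists.mp hc
      obtain ⟨i0, hi0v, hi0le, hi0ρ, _⟩ := hsound _ v hv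
      have hgetD : st.2.1.getD (PySem.Int.mod (PySem.Int.mod (st.2.2.1 + num) p - r) p) 0
          = (i0 : Int) := by
        rw [PySem.Dict.getD_eq_get?_getD, hv, hi0v]; rfl
      rw [hgetD]
      rcases le_total st.1 ((st.2.2.2 + 1) - (i0 : Int)) with hmin | hmin
      · rw [min_eq_left hmin]; exact hshape
      · rw [min_eq_right hmin]
        right
        refine ⟨i0, j + 1, ⟨by omega, by omega, ?_⟩, ?_⟩
        · apply (hiff i0).mp
          rw [← hneed]
          exact hi0ρ
        · rw [hjj]; push_cast; ring
    · exact hshape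
  · -- low
    intro i' j' hvalid hj'
    rcases Nat.lt_or_ge j' (j + 1) with h | h
    · have hbase := hlow i' j' hvalid (by omega)
      split
      · exact le_trans (min_le_left _ _) hbase
      · exact hbase
    · have hj'eq : j' = j + 1 := by omega
      subst hj'eq
      obtain ⟨hij', hj'N, hcond'⟩ := hvalid
      have hρi' : PySem.Int.mod (Sf nums i') p
          = PySem.Int.mod (PySem.Int.mod (st.2.2.1 + num) p - r) p :=
        ((hiff i').mpr hcond').trans hneed.symm
      have hc : st.2.1.contains (PySem.Int.mod (PySem.Int.mod (st.2.2.1 + num) p - r) p)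
          = true := hρi' ▸ hcomp i' (by omega)
      rw [if_pos hc]
      rw [PySem.Dict.contains_eq_isSome_get?] at hc
      obtain ⟨v, hv⟩ := Option.isSome_iff_exists.mp hc
      obtain ⟨i0, hi0v, hi0le, hi0ρ, hi0max⟩ := hsound _ v hv
      have hgetD : st.2.1.getD (PySem.Int.mod (PySem.Int.mod (st.2.2.1 + num) p - r) p) 0
          = (i0 : Int) := by
        rw [PySem.Dict.getD_eq_get?_getD, hv, hi0v]; rfl
      rw [hgetD]
      have hi'le : i' ≤ i0 := hi0max i' (by omega) hρi'
      have : (st.2.2.2 + 1) - (i0 : Int) ≤ ((j + 1 : ℕ) : Int) - (i' : Int) := by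
        rw [hjj]
        have : (i' : Int) ≤ (i0 : Int) := by exact_mod_cast hi'le
        push_cast
        omega
      exact le_trans (min_le_right _ _) this

theorem B_fold (nums : List Int) (p r : Int) (hp : p ≠ 0) (hrmod : PySem.Int.mod r p = r) :
    ∀ (suf : List Int) (j : ℕ) (st : Int × PySem.Dict Int Int × Int × Int),
      j ≤ nums.length → nums.drop j = suf → stInv nums p r j st →
      stInv nums p r nums.length (suf.foldl (stepB p r) st) := by
  intro suf
  induction suf with
  | nil =>
    intro j st hjle hdrop hst
    have : nums.length ≤ j := List.drop_eq_nil_iff.mp hdrop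
    have : j = nums.length := by omega
    subst this
    simpa using hst
  | cons num rest ih =>
    intro j st hjle hdrop hst
    have hjlt : j < nums.length := by
      by_contra h
      rw [List.drop_eq_nil_iff.mpr (by omega)] at hdrop
      simp at hdrop
    have hcons := List.drop_eq_getElem_cons hjlt
    rw [hdrop] at hcons
    have hnum : num = nums[j] := (List.cons.injEq _ _ _ _ ▸ hcons).1
    have hrest : nums.drop (j + 1) = rest := ((List.cons.injEq _ _ _ _ ▸ hcons).2).symm
    rw [List.foldl_cons]
    exact ih (j + 1) (stepB p r st num) (by omega) hrest
      (B_step nums p r hp hrmod j hjlt num hnum st hst)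

theorem B_init (nums : List Int) (p r : Int) :
    stInv nums p r 0 ((nums.length : Int), PySem.Dict.empty.insert 0 0, 0, 0) := by
  refine ⟨rfl, ?_, ⟨?_, ?_⟩, le_refl _, Or.inl rfl, ?_⟩
  · show (0 : Int) = PySem.Int.mod (Sf nums 0) p
    rw [show Sf nums 0 = 0 from rfl, pm_zero]
  · intro ρ v hv
    rw [PySem.Dict.get?_insert] at hv
    split at hv
    · rename_i hρ
      refine ⟨0, ?_, le_refl _, ?_, fun k' hk' _ => hk'⟩
      · simpa using (Option.some.inj hv).symm
      · rw [show Sf nums 0 = 0 from rfl, pm_zero, hρ]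
    · rw [PySem.Dict.get?_empty] at hv
      simp at hv
  · intro k hk
    have : k = 0 := by omega
    subst this
    rw [show Sf nums 0 = 0 from rfl, pm_zero]
    exact PySem.Dict.contains_insert_self _ _ _
  · intro i' j' hv hj'
    have := hv.1
    omega

-- ---- both loops compute the same minimum ----
theorem M_eq (nums : List Int) (p r : Int) (a b : Int)
    (ha1 : a ≤ (nums.length : Int)) (ha2 : goodShape nums p r a)
    (ha3 : ∀ i j : ℕ, validP nums p r i j → a ≤ (j : Int) - (i : Int))
    (hb1 : b ≤ (nums.length : Int)) (hb2 : goodShape nums p r b)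
    (hb3 : ∀ i j : ℕ, validP nums p r i j → b ≤ (j : Int) - (i : Int)) :
    a = b := by
  apply le_antisymm
  · rcases hb2 with h | ⟨i, j, hv, hval⟩
    · rw [h]; exact ha1
    · rw [hval]; exact ha3 i j hv
  · rcases ha2 with h | ⟨i, j, hv, hval⟩
    · rw [h]; exact hb1
    · rw [hval]; exact hb3 i j hv

-- ===== VERDICT (by name: the statement is the Claim_ definition above) =====
theorem sum_array_approach_naive_spec : Claim_equal_sum_array_approach_naive := by
  intro nums p _ hpre
  obtain ⟨hne, hpor⟩ := hpre
  unfold Spec_sum_array_approach_naive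
  unfold sum_array_approach_naive sum_array_approach_naive_alt
  simp only [total_eq nums hne]
  by_cases hlt : nums.sum < p
  · simp only [if_pos hlt]
  · have hp : p ≠ 0 := by
      rcases hpor with h | h
      · exact h
      · exact absurd h hlt
    simp only [if_neg hlt]
    by_cases hr0 : PySem.Int.mod nums.sum p = 0
    · simp only [if_pos hr0]
    · simp only [if_neg hr0]
      rw [A_loop_val nums p (PySem.Int.mod nums.sum p)]
      simp only [PySem.List.len_eq]
      have hB := B_fold nums p (PySem.Int.mod nums.sum p) hp (pm_idem nums.sum p hp)
        nums 0 (((nums.length : Int)), PySem.Dict.empty.insert 0 0, 0, 0) (by omega) rfl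
        (B_init nums p _)
      obtain ⟨_, _, _, hb1, hb2, hb3⟩ := hB
      have hM : MAdef nums p (PySem.Int.mod nums.sum p)
          = (nums.foldl (stepB p (PySem.Int.mod nums.sum p))
              ((nums.length : Int), PySem.Dict.empty.insert 0 0, 0, 0)).1 :=
        M_eq _ _ _ _ _ (MA_le _ _ _) (MA_shape _ _ _)
          (fun i j hv => MA_low _ _ _ i j hv)
          hb1 hb2 (fun i j hv => hb3 i j hv hv.2.1)
      rw [hM]
      rfl
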